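-- pv_equiv track=rewrite | github.com/pkong001/MyPy | StringSplitandJoin.py | split_and_join
-- ===== SOURCE A (Python) =====
-- def split_and_join(line):
--     # Step 1: Split the string into words (mimicking `split(" ")`)
--     words = []
--     current_word = ""
--     for char in line:
--         if char == " ":  # Detect spaces
--             if current_word:  # If there's a word collected, add it
--                 words.append(current_word)
--                 current_word = ""
--         else:
--             current_word += char
--     if current_word:  # Add the last word if there is one
--         words.append(current_word)
--
--     # Step 2: Join the words with a hyphen (mimicking `"-".join(words)`)
--     result = ""
--     for i, word in enumerate(words):
--         if i > 0:  # Add a hyphen before subsequent words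
--             result += "-"
--         result += word
--
--     return result
-- ===== SOURCE B (Python) =====
-- def split_and_join(line):
--     return "-".join(w for w in line.split(" ") if w)
-- ===== Notes on version B (the rewrite author's own statement) =====
-- stated objective: idiomatic
-- what changed: Replaces the manual character-by-character scan with accumulator strings and the manual indexed hyphen-placement loop by a one-line standard-library pipeline: split on the space character, drop empty tokens, str.join.
import Mathlib
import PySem

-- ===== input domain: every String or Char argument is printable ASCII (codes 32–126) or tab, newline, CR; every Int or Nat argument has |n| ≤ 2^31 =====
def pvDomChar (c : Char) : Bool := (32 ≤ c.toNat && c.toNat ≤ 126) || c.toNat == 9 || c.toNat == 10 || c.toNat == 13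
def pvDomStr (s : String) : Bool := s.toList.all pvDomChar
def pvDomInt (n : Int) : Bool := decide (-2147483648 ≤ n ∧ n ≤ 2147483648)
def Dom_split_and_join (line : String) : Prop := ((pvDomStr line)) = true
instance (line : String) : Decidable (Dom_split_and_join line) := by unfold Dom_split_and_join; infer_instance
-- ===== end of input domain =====

-- B replaces A's character-by-character scan and manual hyphen-placement loop with the
-- standard-library pipeline split(" ") / drop empty tokens / "-".join (same cost, idiomatic).

-- ===== PORT A =====
-- Step 1 loop of A: state (words, current_word), one step per character.
def pvAWords : List Char → List (List Char) → List Char → List (List Char)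
  | [], ws, cur => if cur ≠ [] then ws ++ [cur] else ws
  | c :: rest, ws, cur =>
    if c = ' ' then
      if cur ≠ [] then pvAWords rest (ws ++ [cur]) []
      else pvAWords rest ws cur
    else pvAWords rest ws (cur ++ [c])

-- Step 2 loop of A: for i, word in enumerate(words): result += ("-" if i > 0 else "") + word
def pvAJoin : List (List Char) → Nat → List Char → List Char
  | [], _, res => res
  | w :: rest, i, res => pvAJoin rest (i + 1) ((if i > 0 then res ++ ['-'] else res) ++ w)

def split_and_join (line : String) : String :=
  String.mk (pvAJoin (pvAWords line.toList [] []) 0 [])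

-- ===== PORT B =====
def split_and_join_alt (line : String) : String :=
  String.mk (PySem.Chars.join ['-']
    ((PySem.Chars.splitOn line.toList [' ']).filter (fun w => w ≠ [])))

-- ===== PRECONDITION & SPEC =====
def Spec_split_and_join (line : String) (out : String) : Prop := out = split_and_join_alt line
instance (line : String) (out : String) : Decidable (Spec_split_and_join line out) := by unfold Spec_split_and_join; infer_instance

-- ===== CLAIM (what is proved, stated in full; the proofs are below) =====
def Claim_equal_split_and_join : Prop := ∀ (line : String), Dom_split_and_join line → Spec_split_and_join line (split_and_join line)

-- ===== LEMMAS AND PROOFS =====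

-- Simple recursive characterisation of splitting on a single space.
def pvSimpleSplit : List Char → List Char → List (List Char)
  | [], cur => [cur.reverse]
  | c :: rest, cur => if c = ' ' then cur.reverse :: pvSimpleSplit rest [] else pvSimpleSplit rest (c :: cur)

theorem pvSplitOn_go_eq (l : List Char) : ∀ (fuel : Nat) (cur : List Char) (acc : List (List Char)),
    l.length < fuel →
    PySem.Chars.splitOn.go [' '] fuel l cur acc = acc.reverse ++ pvSimpleSplit l cur := by
  induction l with
  | nil =>
    intro fuel cur acc h
    match fuel with
    | fuel + 1 => simp [PySem.Chars.splitOn.go, pvSimpleSplit]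
  | cons c rest ih =>
    intro fuel cur acc h
    match fuel with
    | fuel + 1 =>
      simp only [PySem.Chars.splitOn.go]
      by_cases hc : c = ' '
      · subst hc
        rw [if_pos (by simp [List.isPrefixOf])]
        rw [show List.drop [' '].length (' ' :: rest) = rest from rfl]
        rw [ih fuel [] (cur.reverse :: acc) (by simpa using Nat.lt_of_succ_lt_succ h)]
        simp [pvSimpleSplit]
      · rw [if_neg (by simp [List.isPrefixOf]; exact fun h => hc h.symm)]
        rw [ih fuel (c :: cur) acc (by simpa using Nat.lt_of_succ_lt_succ h)]
        simp [pvSimpleSplit, hc]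

theorem pvSplitOn_eq (l : List Char) :
    PySem.Chars.splitOn l [' '] = pvSimpleSplit l [] := by
  unfold PySem.Chars.splitOn
  simpa using pvSplitOn_go_eq l (l.length + 1) [] [] (Nat.lt_succ_self _)

theorem pvAWords_eq (l : List Char) : ∀ (ws : List (List Char)) (cur : List Char),
    pvAWords l ws cur = ws ++ (pvSimpleSplit l cur.reverse).filter (fun w => w ≠ []) := by
  induction l with
  | nil =>
    intro ws cur
    by_cases h : cur = [] <;> simp [pvAWords, pvSimpleSplit, h]
  | cons c rest ih =>
    intro ws cur
    by_cases hc : c = ' '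
    · subst hc
      by_cases h : cur = []
      · simp [pvAWords, pvSimpleSplit, h, ih]
      · simp [pvAWords, pvSimpleSplit, h, ih]
    · have : (cur ++ [c]).reverse = c :: cur.reverse := by simp
      simp [pvAWords, pvSimpleSplit, hc, ih, this]

theorem pvAJoin_pos (ws : List (List Char)) : ∀ (i : Nat) (res : List Char), 1 ≤ i →
    pvAJoin ws i res = res ++ ws.flatMap (fun w => '-' :: w) := by
  induction ws with
  | nil => intro i res _; simp [pvAJoin]
  | cons w rest ih =>
    intro i res hi
    have : i > 0 := hi
    simp [pvAJoin, this, ih (i + 1) _ (by omega)]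

theorem pvAJoin_eq (ws : List (List Char)) :
    pvAJoin ws 0 [] = PySem.Chars.join ['-'] ws := by
  match ws with
  | [] => rw [PySem.Chars.join_nil]; rfl
  | w :: rest =>
    rw [show pvAJoin (w :: rest) 0 [] = pvAJoin rest 1 w by simp [pvAJoin]]
    rw [pvAJoin_pos rest 1 w (le_refl 1)]
    induction rest generalizing w with
    | nil => simp [PySem.Chars.join_singleton]
    | cons v rest ih =>
      rw [PySem.Chars.join_cons_cons, ← ih v]
      simp

-- ===== VERDICT (by name: the statement is the Claim_ definition above) =====
theorem split_and_join_spec : Claim_equal_split_and_join := by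
  intro line _
  unfold Spec_split_and_join split_and_join split_and_join_alt
  rw [pvAWords_eq, pvSplitOn_eq, pvAJoin_eq]
  simp
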